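-- pv_equiv track=rewrite | github.com/Sakenfor/pixsim7 | pixsim7/backend/main/services/prompt_dsl_adapter.py | _derive_tags_from_blocks
-- ===== SOURCE A (Python) =====
-- from typing import Dict, Any, List, Set
--
-- def _derive_tags_from_blocks(blocks: List[Dict[str, Any]]) -> List[str]:
--     """
--     Very small, generic tag derivation based only on PixSim7-shaped blocks.
--
--     - Role tags: "has:character", "has:action", etc.
--     - Simple intensity/mood hints based on keywords (safe to evolve later).
--     """
--     role_tags: Set[str] = set()
--     keyword_tags: Set[str] = set()
--
--     for block in blocks:
--         role = block.get("role")
--         text = (block.get("text") or "").lower()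
--
--         if role:
--             role_tags.add(f"has:{role}")
--
--         # Extremely conservative starter keywords; extend later as needed
--         if any(word in text for word in ("gentle", "soft", "tender")):
--             keyword_tags.add("tone:soft")
--         if any(word in text for word in ("intense", "harsh", "rough", "violent")):
--             keyword_tags.add("tone:intense")
--         if any(word in text for word in ("pov", "first-person", "viewpoint")):
--             keyword_tags.add("camera:pov")
--         if any(word in text for word in ("close-up", "close up", "tight framing")):
--             keyword_tags.add("camera:closeup")
--
--     # Order is not semantically important, but stable ordering is nice
--     return sorted(role_tags) + sorted(keyword_tags)
-- ===== SOURCE B (Python) =====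
-- # Corpus re-implementation: instead of testing keyword groups block by block,
-- # join all lowered texts into ONE newline-separated corpus (no trigger word
-- # contains a newline, so a match can never span a block boundary) and scan a
-- # flat trigger->tag map once over that corpus; role tags via a set comprehension.
-- _TRIGGER_TAG = {
--     "gentle": "tone:soft",
--     "soft": "tone:soft",
--     "tender": "tone:soft",
--     "intense": "tone:intense",
--     "harsh": "tone:intense",
--     "rough": "tone:intense",
--     "violent": "tone:intense",
--     "pov": "camera:pov",
--     "first-person": "camera:pov",
--     "viewpoint": "camera:pov",
--     "close-up": "camera:closeup",
--     "close up": "camera:closeup",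
--     "tight framing": "camera:closeup",
-- }
--
-- def _derive_tags_from_blocks(blocks):
--     role_tags = {f"has:{b.get('role')}" for b in blocks if b.get("role")}
--     corpus = "\n".join((b.get("text") or "").lower() for b in blocks)
--     keyword_tags = {tag for word, tag in _TRIGGER_TAG.items() if word in corpus}
--     return sorted(role_tags) + sorted(keyword_tags)
-- ===== Notes on version B (the rewrite author's own statement) =====
-- stated objective: alternative
-- what changed: Replaces A's per-block loop accumulating two sets through four inline any-branches by a staged pipeline over different data: role tags from a set comprehension, and keyword tags by joining all lowered texts into one newline-separated corpus (triggers contain no newline, so no match can span a boundary) and scanning a flat trigger-to-tag map once over that single string.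
import Mathlib
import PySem

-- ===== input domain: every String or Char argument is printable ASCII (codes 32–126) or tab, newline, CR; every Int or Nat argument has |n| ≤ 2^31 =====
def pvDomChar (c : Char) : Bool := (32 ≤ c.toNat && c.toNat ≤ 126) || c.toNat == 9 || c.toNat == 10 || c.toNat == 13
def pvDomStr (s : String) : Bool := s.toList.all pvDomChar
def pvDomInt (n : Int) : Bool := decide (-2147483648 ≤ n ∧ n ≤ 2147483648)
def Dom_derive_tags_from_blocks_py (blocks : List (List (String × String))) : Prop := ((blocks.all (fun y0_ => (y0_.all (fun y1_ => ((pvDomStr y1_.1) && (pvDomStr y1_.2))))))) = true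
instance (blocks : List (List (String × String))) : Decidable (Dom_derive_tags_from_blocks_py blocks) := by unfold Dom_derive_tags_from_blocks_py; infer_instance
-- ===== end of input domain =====

-- B replaces A's per-block loop over four inline any-branches by a staged pipeline:
-- role tags from a set comprehension, and keyword tags by joining all lowered texts into
-- one newline-separated corpus scanned once against a flat trigger-to-tag map; no speed claim.

-- ===== PORT A =====
-- f"has:{role}" — ASCII concatenation, exact
def pvHasTag (r : String) : String := String.ofList ('h' :: 'a' :: 's' :: ':' :: r.toList)

def pvAStep (st : PySem.Set String × PySem.Set String) (block : List (String × String)) :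
    PySem.Set String × PySem.Set String :=
  let d := PySem.Dict.mk block
  let role := PySem.Dict.get? d "role"
  -- (block.get("text") or "").lower(): a missing key and an empty string both give ""
  let text := PySem.Str.lower (PySem.Dict.getD d "text" "")
  let rt := match role with
    | some r => if r ≠ "" then PySem.Set.add st.1 (pvHasTag r) else st.1
    | none => st.1
  let kt := st.2
  let kt := if ["gentle", "soft", "tender"].any (fun w => PySem.Str.isIn w text) then PySem.Set.add kt "tone:soft" else kt
  let kt := if ["intense", "harsh", "rough", "violent"].any (fun w => PySem.Str.isIn w text) then PySem.Set.add kt "tone:intense" else kt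
  let kt := if ["pov", "first-person", "viewpoint"].any (fun w => PySem.Str.isIn w text) then PySem.Set.add kt "camera:pov" else kt
  let kt := if ["close-up", "close up", "tight framing"].any (fun w => PySem.Str.isIn w text) then PySem.Set.add kt "camera:closeup" else kt
  (rt, kt)

def derive_tags_from_blocks_py (blocks : List (List (String × String))) : List String :=
  let st := blocks.foldl pvAStep (PySem.Set.empty, PySem.Set.empty)
  PySem.List.sorted st.1 (fun x => x) false ++ PySem.List.sorted st.2 (fun x => x) false

-- ===== PORT B =====
-- the flat trigger -> tag map (_TRIGGER_TAG), in insertion order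
def pvTriggerTag : List (String × String) :=
  [("gentle", "tone:soft"), ("soft", "tone:soft"), ("tender", "tone:soft"),
   ("intense", "tone:intense"), ("harsh", "tone:intense"), ("rough", "tone:intense"),
   ("violent", "tone:intense"),
   ("pov", "camera:pov"), ("first-person", "camera:pov"), ("viewpoint", "camera:pov"),
   ("close-up", "camera:closeup"), ("close up", "camera:closeup"),
   ("tight framing", "camera:closeup")]

-- f"has:{b.get('role')}" for b in blocks if b.get("role")
def pvRoleTag? (block : List (String × String)) : Option String :=
  match PySem.Dict.get? (PySem.Dict.mk block) "role" with
  | some r => if r ≠ "" then some (pvHasTag r) else none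
  | none => none

def derive_tags_from_blocks_py_alt (blocks : List (List (String × String))) : List String :=
  let roleTags := PySem.List.sorted (PySem.Set.ofList (blocks.filterMap pvRoleTag?)) (fun x => x) false
  let corpus := PySem.Str.join "\n"
    (blocks.map (fun b => PySem.Str.lower (PySem.Dict.getD (PySem.Dict.mk b) "text" "")))
  let keywordTags := PySem.List.sorted
    (PySem.Set.ofList ((pvTriggerTag.filter (fun p => PySem.Str.isIn p.1 corpus)).map (·.2)))
    (fun x => x) false
  roleTags ++ keywordTags

-- ===== PRECONDITION & SPEC =====
def Spec_derive_tags_from_blocks_py (blocks : List (List (String × String))) (out : List String) : Prop := out = derive_tags_from_blocks_py_alt blocks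
instance (blocks : List (List (String × String))) (out : List String) : Decidable (Spec_derive_tags_from_blocks_py blocks out) := by unfold Spec_derive_tags_from_blocks_py; infer_instance

-- ===== CLAIM (what is proved, stated in full; the proofs are below) =====
def Claim_equal_derive_tags_from_blocks_py : Prop := ∀ (blocks : List (List (String × String))), Dom_derive_tags_from_blocks_py blocks → Spec_derive_tags_from_blocks_py blocks (derive_tags_from_blocks_py blocks)

-- ===== LEMMAS AND PROOFS =====

-- A's loop, component-wise
def pvRoleF (s : PySem.Set String) (block : List (String × String)) : PySem.Set String :=
  match PySem.Dict.get? (PySem.Dict.mk block) "role" with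
  | some r => if r ≠ "" then PySem.Set.add s (pvHasTag r) else s
  | none => s

def pvTextOf (block : List (String × String)) : String :=
  PySem.Str.lower (PySem.Dict.getD (PySem.Dict.mk block) "text" "")

def pvG (block : List (String × String)) (ws : List String) (tag : String)
    (s : PySem.Set String) : PySem.Set String :=
  if ws.any (fun w => PySem.Str.isIn w (pvTextOf block)) then PySem.Set.add s tag else s

def pvKwF (s : PySem.Set String) (b : List (String × String)) : PySem.Set String :=
  pvG b ["close-up", "close up", "tight framing"] "camera:closeup"
    (pvG b ["pov", "first-person", "viewpoint"] "camera:pov"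
      (pvG b ["intense", "harsh", "rough", "violent"] "tone:intense"
        (pvG b ["gentle", "soft", "tender"] "tone:soft" s)))

theorem pvFoldl_split (blocks : List (List (String × String))) (s1 s2 : PySem.Set String) :
    blocks.foldl pvAStep (s1, s2) = (blocks.foldl pvRoleF s1, blocks.foldl pvKwF s2) := by
  induction blocks generalizing s1 s2 with
  | nil => rfl
  | cons b bs ih =>
    simp only [List.foldl_cons]
    have h : pvAStep (s1, s2) b = (pvRoleF s1 b, pvKwF s2 b) := rfl
    rw [h, ih]

theorem pvRole_fold (blocks : List (List (String × String))) (s : PySem.Set String) :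
    blocks.foldl pvRoleF s = (blocks.filterMap pvRoleTag?).foldl PySem.Set.add s := by
  induction blocks generalizing s with
  | nil => rfl
  | cons b bs ih =>
    simp only [List.foldl_cons, List.filterMap_cons]
    rcases hg : PySem.Dict.get? (PySem.Dict.mk b) "role" with _ | r
    · rw [show pvRoleF s b = s from by simp [pvRoleF, hg],
          show pvRoleTag? b = none from by simp [pvRoleTag?, hg]]
      exact ih s
    · by_cases hr : r = ""
      · rw [show pvRoleF s b = s from by simp [pvRoleF, hg, hr],
            show pvRoleTag? b = none from by simp [pvRoleTag?, hg, hr]]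
        exact ih s
      · rw [show pvRoleF s b = PySem.Set.add s (pvHasTag r) from by simp [pvRoleF, hg, hr],
            show pvRoleTag? b = some (pvHasTag r) from by simp [pvRoleTag?, hg, hr]]
        simp only [List.foldl_cons]
        exact ih _

-- membership in A's keyword accumulation, flattened to the trigger -> tag map
theorem pvMem_pvG (t : String) (b : List (String × String)) (ws : List String) (tag : String)
    (s : PySem.Set String) :
    t ∈ pvG b ws tag s ↔ (t = tag ∧ ∃ w ∈ ws, PySem.Str.isIn w (pvTextOf b) = true) ∨ t ∈ s := by
  unfold pvG
  split_ifs with h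
  · rw [List.any_eq_true] at h
    simp only [PySem.Set.mem_add, h, and_true]
    exact Or.comm
  · constructor
    · exact Or.inr
    · rintro (⟨_, hc⟩ | hm)
      · exact absurd (List.any_eq_true.mpr hc) h
      · exact hm

theorem pvMem_kwF (t : String) (s : PySem.Set String) (b : List (String × String)) :
    t ∈ pvKwF s b ↔ t ∈ s ∨ ∃ p ∈ pvTriggerTag, t = p.2 ∧ PySem.Str.isIn p.1 (pvTextOf b) = true := by
  simp only [pvKwF, pvMem_pvG]
  constructor
  · rintro (⟨rfl, w, hw, hin⟩ | ⟨rfl, w, hw, hin⟩ | ⟨rfl, w, hw, hin⟩ | ⟨rfl, w, hw, hin⟩ | hs)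
    · simp only [List.mem_cons, List.not_mem_nil, or_false] at hw
      rcases hw with rfl | rfl | rfl
      · exact Or.inr ⟨("close-up", "camera:closeup"), by simp [pvTriggerTag], rfl, hin⟩
      · exact Or.inr ⟨("close up", "camera:closeup"), by simp [pvTriggerTag], rfl, hin⟩
      · exact Or.inr ⟨("tight framing", "camera:closeup"), by simp [pvTriggerTag], rfl, hin⟩
    · simp only [List.mem_cons, List.not_mem_nil, or_false] at hw
      rcases hw with rfl | rfl | rfl
      · exact Or.inr ⟨("pov", "camera:pov"), by simp [pvTriggerTag], rfl, hin⟩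
      · exact Or.inr ⟨("first-person", "camera:pov"), by simp [pvTriggerTag], rfl, hin⟩
      · exact Or.inr ⟨("viewpoint", "camera:pov"), by simp [pvTriggerTag], rfl, hin⟩
    · simp only [List.mem_cons, List.not_mem_nil, or_false] at hw
      rcases hw with rfl | rfl | rfl | rfl
      · exact Or.inr ⟨("intense", "tone:intense"), by simp [pvTriggerTag], rfl, hin⟩
      · exact Or.inr ⟨("harsh", "tone:intense"), by simp [pvTriggerTag], rfl, hin⟩
      · exact Or.inr ⟨("rough", "tone:intense"), by simp [pvTriggerTag], rfl, hin⟩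
      · exact Or.inr ⟨("violent", "tone:intense"), by simp [pvTriggerTag], rfl, hin⟩
    · simp only [List.mem_cons, List.not_mem_nil, or_false] at hw
      rcases hw with rfl | rfl | rfl
      · exact Or.inr ⟨("gentle", "tone:soft"), by simp [pvTriggerTag], rfl, hin⟩
      · exact Or.inr ⟨("soft", "tone:soft"), by simp [pvTriggerTag], rfl, hin⟩
      · exact Or.inr ⟨("tender", "tone:soft"), by simp [pvTriggerTag], rfl, hin⟩
    · exact Or.inl hs
  · rintro (hs | ⟨p, hp, ht, hin⟩)
    · exact Or.inr (Or.inr (Or.inr (Or.inr hs)))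
    · simp only [pvTriggerTag, List.mem_cons, List.not_mem_nil, or_false] at hp
      rcases hp with rfl | rfl | rfl | rfl | rfl | rfl | rfl | rfl | rfl | rfl | rfl | rfl | rfl
      · exact Or.inr (Or.inr (Or.inr (Or.inl ⟨ht, "gentle", by simp, hin⟩)))
      · exact Or.inr (Or.inr (Or.inr (Or.inl ⟨ht, "soft", by simp, hin⟩)))
      · exact Or.inr (Or.inr (Or.inr (Or.inl ⟨ht, "tender", by simp, hin⟩)))
      · exact Or.inr (Or.inr (Or.inl ⟨ht, "intense", by simp, hin⟩))
      · exact Or.inr (Or.inr (Or.inl ⟨ht, "harsh", by simp, hin⟩))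
      · exact Or.inr (Or.inr (Or.inl ⟨ht, "rough", by simp, hin⟩))
      · exact Or.inr (Or.inr (Or.inl ⟨ht, "violent", by simp, hin⟩))
      · exact Or.inr (Or.inl ⟨ht, "pov", by simp, hin⟩)
      · exact Or.inr (Or.inl ⟨ht, "first-person", by simp, hin⟩)
      · exact Or.inr (Or.inl ⟨ht, "viewpoint", by simp, hin⟩)
      · exact Or.inl ⟨ht, "close-up", by simp, hin⟩
      · exact Or.inl ⟨ht, "close up", by simp, hin⟩
      · exact Or.inl ⟨ht, "tight framing", by simp, hin⟩

theorem pvMem_kw_fold (blocks : List (List (String × String))) (t : String) (s : PySem.Set String) :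
    t ∈ blocks.foldl pvKwF s ↔
      t ∈ s ∨ ∃ p ∈ pvTriggerTag, t = p.2 ∧ ∃ b ∈ blocks, PySem.Str.isIn p.1 (pvTextOf b) = true := by
  induction blocks generalizing s with
  | nil => simp
  | cons b bs ih =>
    simp only [List.foldl_cons, List.mem_cons]
    rw [ih, pvMem_kwF]
    constructor
    · rintro ((h | ⟨p, hp, rfl, hw⟩) | ⟨p, hp, rfl, b', hb', hw⟩)
      · exact Or.inl h
      · exact Or.inr ⟨p, hp, rfl, b, Or.inl rfl, hw⟩
      · exact Or.inr ⟨p, hp, rfl, b', Or.inr hb', hw⟩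
    · rintro (h | ⟨p, hp, rfl, b', (rfl | hb'), hw⟩)
      · exact Or.inl (Or.inl h)
      · exact Or.inl (Or.inr ⟨p, hp, rfl, hw⟩)
      · exact Or.inr ⟨p, hp, rfl, b', hb', hw⟩

theorem pvNodup_pvG (b : List (String × String)) (ws : List String) (tag : String)
    (s : PySem.Set String) (h : s.Nodup) : (pvG b ws tag s).Nodup := by
  unfold pvG
  split_ifs
  · apply PySem.Set.nodup_add
    exact h
  · exact h

theorem pvNodup_kw_fold (blocks : List (List (String × String))) (s : PySem.Set String)
    (h : s.Nodup) : (blocks.foldl pvKwF s).Nodup := by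
  induction blocks generalizing s with
  | nil => exact h
  | cons b bs ih =>
    exact ih _ (pvNodup_pvG _ _ _ _ (pvNodup_pvG _ _ _ _ (pvNodup_pvG _ _ _ _ (pvNodup_pvG _ _ _ _ h))))

-- a word without the separator character cannot match across 'u ++ c :: v'
theorem pvPrefix_of_prefix_sep (w : List Char) (c : Char) (v : List Char) :
    ∀ (u : List Char), w <+: u ++ c :: v → c ∉ w → w <+: u := by
  intro u
  induction u generalizing w with
  | nil =>
    intro h hc
    rcases w with _ | ⟨x, w'⟩
    · exact List.nil_prefix
    · rcases h with ⟨t, ht⟩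
      simp only [List.nil_append, List.cons_append, List.cons.injEq] at ht
      exact absurd (ht.1 ▸ List.mem_cons_self) hc
  | cons y u' ih =>
    intro h hc
    rcases w with _ | ⟨x, w'⟩
    · exact List.nil_prefix
    · rcases h with ⟨t, ht⟩
      simp only [List.cons_append, List.cons.injEq] at ht
      rcases ht with ⟨rfl, ht⟩
      have : w' <+: u' := ih w' ⟨t, ht⟩ (fun hm => hc (List.mem_cons_of_mem _ hm))
      exact List.cons_prefix_cons.mpr ⟨rfl, this⟩

theorem pvInfix_sep (w : List Char) (c : Char) (u v : List Char) (hc : c ∉ w) :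
    w <:+: u ++ c :: v ↔ w <:+: u ∨ w <:+: v := by
  constructor
  · intro h
    induction u with
    | nil =>
      rw [List.nil_append, List.infix_cons_iff] at h
      rcases h with h | h
      · have hw : w <+: ([] : List Char) := pvPrefix_of_prefix_sep w c v [] h hc
        rw [List.prefix_nil] at hw
        subst hw
        exact Or.inr List.nil_infix
      · exact Or.inr h
    | cons y u' ih =>
      rw [List.cons_append, List.infix_cons_iff] at h
      rcases h with h | h
      · exact Or.inl ((pvPrefix_of_prefix_sep w c v (y :: u') h hc).isInfix)
      · rcases ih h with h' | h'
        · exact Or.inl (h'.trans (List.suffix_cons y u').isInfix)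
        · exact Or.inr h'
  · rintro (h | h)
    · exact h.trans ⟨[], c :: v, by simp⟩
    · exact h.trans ⟨u ++ [c], [], by simp⟩

-- sub in '\n'.join(texts) ↔ sub in some text, for a nonempty sub without '\n'
theorem pvInfix_join (w : List Char) (c : Char) (hc : c ∉ w) (hne : w ≠ []) :
    ∀ (ts : List (List Char)), w <:+: PySem.Chars.join [c] ts ↔ ∃ t ∈ ts, w <:+: t := by
  intro ts
  induction ts with
  | nil =>
    rw [PySem.Chars.join_nil]
    simp [List.infix_nil, hne]
  | cons t rest ih =>
    rcases rest with _ | ⟨t2, rest'⟩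
    · rw [PySem.Chars.join_singleton]
      simp
    · rw [PySem.Chars.join_cons_cons, List.append_assoc, List.singleton_append,
        pvInfix_sep w c t _ hc, ih]
      simp only [List.mem_cons]
      constructor
      · rintro (h | ⟨t', ht', hw⟩)
        · exact ⟨t, Or.inl rfl, h⟩
        · exact ⟨t', Or.inr ht', hw⟩
      · rintro ⟨t', (rfl | ht'), hw⟩
        · exact Or.inl hw
        · exact Or.inr ⟨t', ht', hw⟩

theorem pvIsIn_corpus (w : String) (hc : '\n' ∉ w.toList) (hne : w.toList ≠ [])
    (blocks : List (List (String × String))) :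
    PySem.Str.isIn w (PySem.Str.join "\n" (blocks.map pvTextOf)) = true ↔
      ∃ b ∈ blocks, PySem.Str.isIn w (pvTextOf b) = true := by
  rw [PySem.Str.isIn_iff_infix, PySem.Str.toList_join,
    show ("\n" : String).toList = ['\n'] from rfl, List.map_map,
    pvInfix_join w.toList '\n' hc hne]
  constructor
  · rintro ⟨t, ht, hw⟩
    rcases List.mem_map.mp ht with ⟨b, hb, rfl⟩
    exact ⟨b, hb, (PySem.Str.isIn_iff_infix _ _).mpr hw⟩
  · rintro ⟨b, hb, hw⟩
    exact ⟨(pvTextOf b).toList, List.mem_map.mpr ⟨b, hb, rfl⟩,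
      (PySem.Str.isIn_iff_infix _ _).mp hw⟩

theorem pvTrigger_ok (p : String × String) (hp : p ∈ pvTriggerTag) :
    '\n' ∉ p.1.toList ∧ p.1.toList ≠ [] := by
  fin_cases hp <;> exact ⟨by decide, by decide⟩

-- ===== VERDICT (by name: the statement is the Claim_ definition above) =====
theorem derive_tags_from_blocks_py_spec : Claim_equal_derive_tags_from_blocks_py := by
  intro blocks _
  unfold Spec_derive_tags_from_blocks_py derive_tags_from_blocks_py derive_tags_from_blocks_py_alt
  rw [pvFoldl_split, pvRole_fold]
  show PySem.List.sorted (PySem.Set.ofList (blocks.filterMap pvRoleTag?)) (fun x => x) false ++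
       PySem.List.sorted (blocks.foldl pvKwF PySem.Set.empty) (fun x => x) false = _
  congr 1
  rw [PySem.List.sorted_id_eq_sorted_id_iff_perm]
  refine (List.perm_ext_iff_of_nodup (pvNodup_kw_fold blocks PySem.Set.empty List.nodup_nil)
    (PySem.Set.nodup_ofList _)).mpr ?_
  intro t
  rw [pvMem_kw_fold, PySem.Set.mem_ofList]
  simp only [PySem.Set.empty, List.not_mem_nil, false_or, List.mem_map, List.mem_filter]
  constructor
  · rintro ⟨p, hp, rfl, hb⟩
    refine ⟨p, ⟨hp, ?_⟩, rfl⟩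
    exact (pvIsIn_corpus p.1 ((pvTrigger_ok p hp).1) ((pvTrigger_ok p hp).2) blocks).mpr hb
  · rintro ⟨p, ⟨hp, hin⟩, rfl⟩
    exact ⟨p, hp, rfl, (pvIsIn_corpus p.1 ((pvTrigger_ok p hp).1) ((pvTrigger_ok p hp).2) blocks).mp hin⟩
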